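-- pv_equiv track=rewrite | github.com/amezaikupan/2023_HCMUS_AI_P01 | algorithm/Level3.py | Update_Pacman_view
-- ===== SOURCE A (Python) =====
-- def Update_Pacman_view(map,current_view, pos):
--
--     x = pos[0] - 3
--     y = pos[1] - 3
--     Pacman_view = current_view
--     for i in range(7):
--         for j in range(7):
--             if 0 <= x + i < len(current_view) and 0 <= y + j < len(current_view[0]) :
--                 Pacman_view[abs(x+ i)][abs(y+ j)] = map[abs(x + i)][abs(y + j)]
--     return Pacman_view
-- ===== SOURCE B (Python) =====
-- def Update_Pacman_view(map, current_view, pos):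
--     view = current_view
--     if not current_view:
--         return view
--     r0 = max(0, pos[0] - 3)
--     r1 = min(len(current_view), pos[0] + 4)
--     c0 = max(0, pos[1] - 3)
--     c1 = min(len(current_view[0]), pos[1] + 4)
--     if c0 < c1:
--         for r in range(r0, r1):
--             view[r][c0:c1] = map[r][c0:c1]
--     return view
-- ===== Notes on version B (the rewrite author's own statement) =====
-- stated objective: idiomatic
-- what changed: B computes the clamped window bounds r0,r1,c0,c1 once and copies each valid row with one slice assignment view[r][c0:c1] = map[r][c0:c1], instead of A's 49-iteration double loop with a per-cell bounds guard and per-cell assignment.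
import Mathlib
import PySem

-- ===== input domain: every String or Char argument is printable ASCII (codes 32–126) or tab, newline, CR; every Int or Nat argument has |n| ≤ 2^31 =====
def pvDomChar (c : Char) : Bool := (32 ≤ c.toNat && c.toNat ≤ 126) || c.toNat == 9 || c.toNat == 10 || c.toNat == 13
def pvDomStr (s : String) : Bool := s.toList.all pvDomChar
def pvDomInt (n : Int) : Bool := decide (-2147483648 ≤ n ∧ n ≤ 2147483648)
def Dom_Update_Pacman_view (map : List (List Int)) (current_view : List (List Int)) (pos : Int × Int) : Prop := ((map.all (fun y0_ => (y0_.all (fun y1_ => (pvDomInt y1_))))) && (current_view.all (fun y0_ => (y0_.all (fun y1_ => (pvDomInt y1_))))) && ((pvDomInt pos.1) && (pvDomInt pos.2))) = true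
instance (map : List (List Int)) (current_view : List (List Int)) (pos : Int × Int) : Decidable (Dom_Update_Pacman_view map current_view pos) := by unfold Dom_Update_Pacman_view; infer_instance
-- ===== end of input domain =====

-- B replaces A's 49 per-cell guarded updates with clamped window bounds computed once and one
-- row-slice copy per valid row (idiomatic decomposition, similar cost). Both A and B mutate
-- current_view in place in Python (the same mutation); the equivalence proved here is about the
-- returned value.

-- ===== PORT A =====
-- literal transliteration of A: abs(x+i)/abs(y+j) are only evaluated under the guard
-- 0 ≤ x+i / 0 ≤ y+j, where abs is the identity, so they are ported as .toNat; the
-- map[..][..] reads are ported with getD, total stand-ins that agree with Python on Pre_.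
def Update_Pacman_view (map : List (List Int)) (current_view : List (List Int)) (pos : Int × Int) : List (List Int) :=
  let x := pos.1 - 3
  let y := pos.2 - 3
  (List.range 7).foldl (fun pv (i : Nat) =>
    (List.range 7).foldl (fun pv (j : Nat) =>
      if 0 ≤ x + (i : Int) ∧ x + (i : Int) < (current_view.length : Int) ∧
         0 ≤ y + (j : Int) ∧ y + (j : Int) < ((current_view.headD []).length : Int) then
        pv.set (x + (i : Int)).toNat
          ((pv.getD (x + (i : Int)).toNat []).set (y + (j : Int)).toNat
            ((map.getD (x + (i : Int)).toNat []).getD (y + (j : Int)).toNat 0))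
      else pv) pv) current_view

-- ===== PORT B =====
def Update_Pacman_view_alt (map : List (List Int)) (current_view : List (List Int)) (pos : Int × Int) : List (List Int) :=
  let view := current_view
  if current_view.isEmpty then view
  else
    let r0 := max 0 (pos.1 - 3)
    let r1 := min (current_view.length : Int) (pos.1 + 4)
    let c0 := max 0 (pos.2 - 3)
    let c1 := min ((current_view.headD []).length : Int) (pos.2 + 4)
    if c0 < c1 then
      -- view[r][c0:c1] = map[r][c0:c1] : slice assignment with 0 ≤ c0 < c1 is prefix ++ new slice ++ suffix
      (PySem.List.pyRange r0 r1 1).foldl (fun v (r : Int) =>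
        v.set r.toNat
          ((v.getD r.toNat []).take c0.toNat
            ++ PySem.List.slice (map.getD r.toNat []) (some c0) (some c1)
            ++ (v.getD r.toNat []).drop c1.toNat)) view
    else view

-- ===== PRECONDITION & SPEC =====
-- Pre_ is exactly the set of inputs where A returns normally: every window cell accepted by A's
-- guard must be a valid index into map, into map's row and into current_view's row (otherwise
-- Python raises IndexError there).
def Pre_Update_Pacman_view (map : List (List Int)) (current_view : List (List Int)) (pos : Int × Int) : Prop :=
  ∀ r < current_view.length, ∀ c < (current_view.headD []).length,
    (pos.1 - 3 ≤ (r : Int) ∧ (r : Int) < pos.1 + 4 ∧ pos.2 - 3 ≤ (c : Int) ∧ (c : Int) < pos.2 + 4) →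
    r < map.length ∧ c < (map.getD r []).length ∧ c < (current_view.getD r []).length
instance (map : List (List Int)) (current_view : List (List Int)) (pos : Int × Int) : Decidable (Pre_Update_Pacman_view map current_view pos) := by unfold Pre_Update_Pacman_view; infer_instance

def pvWitness_Update_Pacman_view : List (List Int) × List (List Int) × (Int × Int) := ([[1]], [[0]], (0, 0))

def Spec_Update_Pacman_view (map : List (List Int)) (current_view : List (List Int)) (pos : Int × Int) (out : List (List Int)) : Prop := out = Update_Pacman_view_alt map current_view pos
instance (map : List (List Int)) (current_view : List (List Int)) (pos : Int × Int) (out : List (List Int)) : Decidable (Spec_Update_Pacman_view map current_view pos out) := by unfold Spec_Update_Pacman_view; infer_instance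

-- ===== CLAIM (what is proved, stated in full; the proofs are below) =====
def Claim_equal_Update_Pacman_view : Prop := ∀ (map : List (List Int)) (current_view : List (List Int)) (pos : Int × Int), Dom_Update_Pacman_view map current_view pos → Pre_Update_Pacman_view map current_view pos → Spec_Update_Pacman_view map current_view pos (Update_Pacman_view map current_view pos)

-- ===== LEMMAS AND PROOFS =====

-- The row transformation A applies to the window row r (the inner j-loop).
def pvRowA (map : List (List Int)) (y : Int) (w : Nat) (r : Nat) (row : List Int) : List Int :=
  (List.range 7).foldl (fun row (j : Nat) =>
    if 0 ≤ y + (j : Int) ∧ y + (j : Int) < (w : Int) then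
      row.set (y + (j : Int)).toNat ((map.getD r []).getD (y + (j : Int)).toNat 0)
    else row) row

-- The row transformation B applies to the window row r (the slice assignment).
def pvRowB (map : List (List Int)) (c0 c1 : Int) (r : Nat) (row : List Int) : List Int :=
  row.take c0.toNat ++ PySem.List.slice (map.getD r []) (some c0) (some c1) ++ row.drop c1.toNat

-- A fold of steps that may only update the fixed row r equals the single update of row r
-- by the folded row transformation.
theorem pv_hoist {ι α : Type} (d : α) (q : ι → Prop) [DecidablePred q] (u : ι → α → α) (r : Nat) :
    ∀ (js : List ι) (pv : List α),
      js.foldl (fun pv j => if q j then pv.set r (u j (pv.getD r d)) else pv) pv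
        = pv.set r (js.foldl (fun row j => if q j then u j row else row) (pv.getD r d)) := by
  intro js
  induction js with
  | nil =>
    intro pv
    by_cases hr : r < pv.length
    · simp only [List.foldl_nil]
      rw [List.getD_eq_getElem pv d hr, List.set_getElem_self]
    · simp only [List.foldl_nil, List.set_eq_of_length_le (le_of_not_gt hr)]
  | cons j js ih =>
    intro pv
    simp only [List.foldl_cons]
    by_cases hq : q j
    · simp only [if_pos hq, ih]
      by_cases hr : r < pv.length
      · rw [List.set_set]
        have hget : (pv.set r (u j (pv.getD r d))).getD r d = u j (pv.getD r d) := by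
          rw [List.getD_eq_getElem?_getD, List.getElem?_set_self hr]; rfl
        rw [hget]
      · have hle := le_of_not_gt hr
        have h1 : pv.set r (u j (pv.getD r d)) = pv := List.set_eq_of_length_le hle
        rw [h1, List.set_eq_of_length_le hle, List.set_eq_of_length_le hle]
    · simp only [if_neg hq, ih]

-- Row-by-row characterisation of a fold of guarded single-row updates over distinct rows.
theorem pv_foldl_set_getElem? {ι α : Type} (d : α) (cond : ι → Prop) [DecidablePred cond]
    (loc : ι → Nat) (f : Nat → α → α) :
    ∀ (is : List ι) (xs : List α) (r : Nat), is.Nodup →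
      (∀ i ∈ is, cond i → loc i < xs.length) →
      (∀ i ∈ is, ∀ i' ∈ is, cond i → cond i' → loc i = loc i' → i = i') →
      (is.foldl (fun xs i => if cond i then xs.set (loc i) (f (loc i) (xs.getD (loc i) d)) else xs) xs)[r]?
        = if is.any (fun i => decide (cond i) && (loc i == r)) then some (f r (xs.getD r d)) else xs[r]? := by
  intro is
  induction is with
  | nil => intro xs r _ _ _; simp
  | cons i is ih =>
    intro xs r hnd hL hinj
    simp only [List.foldl_cons, List.any_cons]
    by_cases hc : cond i
    · rw [if_pos hc]
      by_cases hlr : loc i = r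
      · have hhead : (decide (cond i) && (loc i == r)) = true := by
          simp [hc, hlr]
        have htail : is.any (fun i' => decide (cond i') && (loc i' == r)) = false := by
          rw [Bool.eq_false_iff]
          intro hany
          obtain ⟨i', hi', hprop⟩ := List.any_eq_true.mp hany
          rw [Bool.and_eq_true, beq_iff_eq, decide_eq_true_eq] at hprop
          have hc' : cond i' := hprop.1
          have hl' : loc i' = r := hprop.2
          have heq : i = i' := hinj i List.mem_cons_self i' (List.mem_cons_of_mem _ hi') hc hc' (by omega)
          exact (List.nodup_cons.mp hnd).1 (heq ▸ hi')
        have hlt : loc i < xs.length := hL i List.mem_cons_self hc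
        rw [ih (xs.set (loc i) (f (loc i) (xs.getD (loc i) d))) r (List.nodup_cons.mp hnd).2
              (by intro a ha hca; rw [List.length_set]; exact hL a (List.mem_cons_of_mem _ ha) hca)
              (by intro a ha b hb hca hcb; exact hinj a (List.mem_cons_of_mem _ ha) b (List.mem_cons_of_mem _ hb) hca hcb)]
        simp only [hhead, htail, Bool.true_or, Bool.false_eq_true, if_false, if_true]
        subst hlr
        exact List.getElem?_set_self hlt
      · have hhead : (decide (cond i) && (loc i == r)) = false := by
          simp [hlr]
        rw [ih (xs.set (loc i) (f (loc i) (xs.getD (loc i) d))) r (List.nodup_cons.mp hnd).2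
              (by intro a ha hca; rw [List.length_set]; exact hL a (List.mem_cons_of_mem _ ha) hca)
              (by intro a ha b hb hca hcb; exact hinj a (List.mem_cons_of_mem _ ha) b (List.mem_cons_of_mem _ hb) hca hcb)]
        simp only [hhead, Bool.false_or]
        have h1 : (xs.set (loc i) (f (loc i) (xs.getD (loc i) d)))[r]? = xs[r]? :=
          List.getElem?_set_ne hlr
        have h2 : (xs.set (loc i) (f (loc i) (xs.getD (loc i) d))).getD r d = xs.getD r d := by
          rw [List.getD_eq_getElem?_getD, h1, List.getD_eq_getElem?_getD]
        rw [h1, h2]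
    · rw [if_neg hc]
      have hhead : (decide (cond i) && (loc i == r)) = false := by
        simp [hc]
      rw [ih xs r (List.nodup_cons.mp hnd).2
        (fun a ha hca => hL a (List.mem_cons_of_mem _ ha) hca)
        (fun a ha b hb hca hcb => hinj a (List.mem_cons_of_mem _ ha) b (List.mem_cons_of_mem _ hb) hca hcb)]
      simp only [hhead, Bool.false_or]

-- A fold whose every step fixes the accumulator is the identity.
theorem pv_foldl_id {ι α : Type} : ∀ (l : List ι) (acc : α) (f : α → ι → α),
    (∀ a i, i ∈ l → f a i = a) → l.foldl f acc = acc := by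
  intro l
  induction l with
  | nil => intros; rfl
  | cons i l ih =>
    intro acc f h
    rw [List.foldl_cons, h acc i List.mem_cons_self]
    exact ih acc f (fun a j hj => h a j (List.mem_cons_of_mem _ hj))

-- Zeta-reduced definitional forms of the two ports (proved by rfl).
theorem pvA_def (map cv : List (List Int)) (pos : Int × Int) :
    Update_Pacman_view map cv pos = (List.range 7).foldl (fun pv (i : Nat) =>
      (List.range 7).foldl (fun pv (j : Nat) =>
        if 0 ≤ pos.1 - 3 + (i : Int) ∧ pos.1 - 3 + (i : Int) < (cv.length : Int) ∧
           0 ≤ pos.2 - 3 + (j : Int) ∧ pos.2 - 3 + (j : Int) < ((cv.headD []).length : Int) then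
          pv.set (pos.1 - 3 + (i : Int)).toNat
            ((pv.getD (pos.1 - 3 + (i : Int)).toNat []).set (pos.2 - 3 + (j : Int)).toNat
              ((map.getD (pos.1 - 3 + (i : Int)).toNat []).getD (pos.2 - 3 + (j : Int)).toNat 0))
        else pv) pv) cv := rfl

theorem pvB_def (map cv : List (List Int)) (pos : Int × Int) :
    Update_Pacman_view_alt map cv pos =
      (if cv.isEmpty then cv
       else if max 0 (pos.2 - 3) < min (((cv.headD []).length : Int)) (pos.2 + 4) then
         (PySem.List.pyRange (max 0 (pos.1 - 3)) (min ((cv.length : Int)) (pos.1 + 4)) 1).foldl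
           (fun v (r : Int) =>
             v.set r.toNat
               ((v.getD r.toNat []).take (max 0 (pos.2 - 3)).toNat
                 ++ PySem.List.slice (map.getD r.toNat []) (some (max 0 (pos.2 - 3)))
                     (some (min (((cv.headD []).length : Int)) (pos.2 + 4)))
                 ++ (v.getD r.toNat []).drop (min (((cv.headD []).length : Int)) (pos.2 + 4)).toNat)) cv
       else cv) := rfl

-- Row-by-row characterisation of port A.
theorem pvA_char (map cv : List (List Int)) (pos : Int × Int) (r : Nat) :
    (Update_Pacman_view map cv pos)[r]? =
      if (List.range 7).any (fun i =>
            decide (0 ≤ pos.1 - 3 + (i : Int) ∧ pos.1 - 3 + (i : Int) < (cv.length : Int))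
              && ((pos.1 - 3 + (i : Int)).toNat == r)) then
        some (pvRowA map (pos.2 - 3) (cv.headD []).length r (cv.getD r []))
      else cv[r]? := by
  rw [pvA_def]
  have hstep : (fun (pv : List (List Int)) (i : Nat) =>
      (List.range 7).foldl (fun pv (j : Nat) =>
        if 0 ≤ pos.1 - 3 + (i : Int) ∧ pos.1 - 3 + (i : Int) < (cv.length : Int) ∧
           0 ≤ pos.2 - 3 + (j : Int) ∧ pos.2 - 3 + (j : Int) < ((cv.headD []).length : Int) then
          pv.set (pos.1 - 3 + (i : Int)).toNat
            ((pv.getD (pos.1 - 3 + (i : Int)).toNat []).set (pos.2 - 3 + (j : Int)).toNat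
              ((map.getD (pos.1 - 3 + (i : Int)).toNat []).getD (pos.2 - 3 + (j : Int)).toNat 0))
        else pv) pv)
      = (fun (pv : List (List Int)) (i : Nat) =>
          if 0 ≤ pos.1 - 3 + (i : Int) ∧ pos.1 - 3 + (i : Int) < (cv.length : Int) then
            pv.set (pos.1 - 3 + (i : Int)).toNat
              (pvRowA map (pos.2 - 3) (cv.headD []).length (pos.1 - 3 + (i : Int)).toNat
                (pv.getD (pos.1 - 3 + (i : Int)).toNat []))
          else pv) := by
    funext pv i
    by_cases hci : 0 ≤ pos.1 - 3 + (i : Int) ∧ pos.1 - 3 + (i : Int) < (cv.length : Int)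
    · rw [if_pos hci]
      have hiff : ∀ j : Nat,
          (0 ≤ pos.1 - 3 + (i : Int) ∧ pos.1 - 3 + (i : Int) < (cv.length : Int) ∧
           0 ≤ pos.2 - 3 + (j : Int) ∧ pos.2 - 3 + (j : Int) < ((cv.headD []).length : Int))
          ↔ (0 ≤ pos.2 - 3 + (j : Int) ∧ pos.2 - 3 + (j : Int) < ((cv.headD []).length : Int)) :=
        fun j => ⟨fun h => ⟨h.2.2.1, h.2.2.2⟩, fun h => ⟨hci.1, hci.2, h.1, h.2⟩⟩
      simp only [hiff]
      exact pv_hoist [] _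
        (fun (j : Nat) (row : List Int) =>
          row.set (pos.2 - 3 + (j : Int)).toNat
            ((map.getD (pos.1 - 3 + (i : Int)).toNat []).getD (pos.2 - 3 + (j : Int)).toNat 0))
        (pos.1 - 3 + (i : Int)).toNat (List.range 7) pv
    · rw [if_neg hci]
      exact pv_foldl_id (List.range 7) pv _
        (fun a j _ => if_neg (by intro h; exact hci ⟨h.1, h.2.1⟩))
  rw [hstep]
  exact pv_foldl_set_getElem? []
    (fun i : Nat => 0 ≤ pos.1 - 3 + (i : Int) ∧ pos.1 - 3 + (i : Int) < (cv.length : Int))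
    (fun i : Nat => (pos.1 - 3 + (i : Int)).toNat)
    (pvRowA map (pos.2 - 3) (cv.headD []).length)
    (List.range 7) cv r (List.nodup_range)
    (by intro i _ hc; dsimp only; omega)
    (by intro a _ b _ hca hcb heq; dsimp only at heq; omega)

-- Row-by-row characterisation of port B (in the branch that copies).
theorem pvB_char (map cv : List (List Int)) (pos : Int × Int) (r : Nat)
    (hne : cv.isEmpty = false)
    (hcc : max 0 (pos.2 - 3) < min (((cv.headD []).length : Int)) (pos.2 + 4)) :
    (Update_Pacman_view_alt map cv pos)[r]? =
      if (PySem.List.pyRange (max 0 (pos.1 - 3)) (min ((cv.length : Int)) (pos.1 + 4)) 1).any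
            (fun rr => rr.toNat == r) then
        some (pvRowB map (max 0 (pos.2 - 3)) (min (((cv.headD []).length : Int)) (pos.2 + 4)) r
          (cv.getD r []))
      else cv[r]? := by
  rw [pvB_def, hne]
  simp only [Bool.false_eq_true, if_false]
  rw [if_pos hcc]
  have hstep : (fun (v : List (List Int)) (rr : Int) =>
      v.set rr.toNat
        ((v.getD rr.toNat []).take (max 0 (pos.2 - 3)).toNat
          ++ PySem.List.slice (map.getD rr.toNat []) (some (max 0 (pos.2 - 3)))
              (some (min (((cv.headD []).length : Int)) (pos.2 + 4)))
          ++ (v.getD rr.toNat []).drop (min (((cv.headD []).length : Int)) (pos.2 + 4)).toNat))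
      = (fun (v : List (List Int)) (rr : Int) =>
          if True then
            v.set rr.toNat
              (pvRowB map (max 0 (pos.2 - 3)) (min (((cv.headD []).length : Int)) (pos.2 + 4))
                rr.toNat (v.getD rr.toNat []))
          else v) := by
    funext v rr
    rw [if_pos trivial]
    rfl
  rw [hstep]
  have h := pv_foldl_set_getElem? [] (fun _ : Int => True) (fun rr : Int => rr.toNat)
    (pvRowB map (max 0 (pos.2 - 3)) (min (((cv.headD []).length : Int)) (pos.2 + 4)))
    (PySem.List.pyRange (max 0 (pos.1 - 3)) (min ((cv.length : Int)) (pos.1 + 4)) 1) cv r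
    (PySem.List.nodup_pyRange_one _ _)
    (by intro rr hrr _; rw [PySem.List.mem_pyRange_one] at hrr; dsimp only; omega)
    (by intro a ha b hb _ _ heq
        rw [PySem.List.mem_pyRange_one] at ha hb
        dsimp only at heq
        omega)
  rw [h]
  simp only [decide_true, Bool.true_and]

-- The A-side window test, as an arithmetic condition on the row index.
theorem pvA_any_iff (n : Nat) (x : Int) (r : Nat) :
    ((List.range 7).any (fun i =>
        decide (0 ≤ x + (i : Int) ∧ x + (i : Int) < (n : Int)) && ((x + (i : Int)).toNat == r)) = true)
      ↔ (x ≤ (r : Int) ∧ (r : Int) < x + 7 ∧ (r : Int) < (n : Int)) := by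
  rw [List.any_eq_true]
  constructor
  · rintro ⟨i, hi, hp⟩
    rw [List.mem_range] at hi
    rw [Bool.and_eq_true, decide_eq_true_eq, beq_iff_eq] at hp
    omega
  · intro h
    refine ⟨((r : Int) - x).toNat, by rw [List.mem_range]; omega, ?_⟩
    rw [Bool.and_eq_true, decide_eq_true_eq, beq_iff_eq]
    omega

-- The B-side window test, as an arithmetic condition on the row index.
theorem pvB_any_iff (a b : Int) (r : Nat) (ha : 0 ≤ a) :
    ((PySem.List.pyRange a b 1).any (fun rr => rr.toNat == r) = true)
      ↔ (a ≤ (r : Int) ∧ (r : Int) < b) := by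
  rw [List.any_eq_true]
  constructor
  · rintro ⟨rr, hrr, hp⟩
    rw [PySem.List.mem_pyRange_one] at hrr
    rw [beq_iff_eq] at hp
    omega
  · intro h
    exact ⟨(r : Int), PySem.List.mem_pyRange_one.mpr ⟨h.1, h.2⟩, by rw [beq_iff_eq]; omega⟩

-- When the clamped column window is empty, A's inner loop does nothing.
theorem pvRowA_id (map : List (List Int)) (y : Int) (w : Nat) (r : Nat) (row : List Int)
    (h : ¬ max 0 y < min (w : Int) (y + 7)) : pvRowA map y w r row = row := by
  unfold pvRowA
  exact pv_foldl_id (List.range 7) row _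
    (fun a j hj => if_neg (by rw [List.mem_range] at hj; omega))

-- On a row the window reaches, A's 7 guarded cell writes equal B's slice assignment.
theorem pvRow_eq (map : List (List Int)) (y : Int) (w : Nat) (r : Nat) (row : List Int)
    (c0 c1 : Int) (hc0 : c0 = max 0 y) (hc1 : c1 = min (w : Int) (y + 7))
    (hcc : c0 < c1)
    (hrow : c1.toNat ≤ row.length)
    (hm : c1.toNat ≤ (map.getD r []).length) :
    pvRowA map y w r row = pvRowB map c0 c1 r row := by
  apply List.ext_getElem?
  intro c
  have hA : (pvRowA map y w r row)[c]? =
      if (List.range 7).any (fun j =>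
            decide (0 ≤ y + (j : Int) ∧ y + (j : Int) < (w : Int)) && ((y + (j : Int)).toNat == c)) then
        some ((map.getD r []).getD c 0)
      else row[c]? := by
    exact pv_foldl_set_getElem? 0
      (fun j : Nat => 0 ≤ y + (j : Int) ∧ y + (j : Int) < (w : Int))
      (fun j : Nat => (y + (j : Int)).toNat)
      (fun (c : Nat) (_ : Int) => (map.getD r []).getD c 0)
      (List.range 7) row c (List.nodup_range)
      (by intro j hj hc; rw [List.mem_range] at hj; dsimp only; omega)
      (by intro a _ b _ hca hcb heq; dsimp only at heq; omega)
  rw [hA]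
  have hanyiff : ((List.range 7).any (fun j =>
        decide (0 ≤ y + (j : Int) ∧ y + (j : Int) < (w : Int)) && ((y + (j : Int)).toNat == c)) = true)
      ↔ (c0 ≤ (c : Int) ∧ (c : Int) < c1) := by
    rw [List.any_eq_true]
    constructor
    · rintro ⟨j, hj, hp⟩
      rw [List.mem_range] at hj
      rw [Bool.and_eq_true, decide_eq_true_eq, beq_iff_eq] at hp
      omega
    · intro h
      refine ⟨((c : Int) - y).toNat, by rw [List.mem_range]; omega, ?_⟩
      rw [Bool.and_eq_true, decide_eq_true_eq, beq_iff_eq]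
      omega
  -- compute the B-side row elementwise
  unfold pvRowB
  have hslice : PySem.List.slice (map.getD r []) (some c0) (some c1)
      = ((map.getD r []).drop c0.toNat).take (c1.toNat - c0.toNat) :=
    PySem.List.slice_toNat _ (by omega) (by omega)
  rw [hslice]
  have hlt : (row.take c0.toNat).length = c0.toNat := by
    rw [List.length_take]; omega
  have hls : (((map.getD r []).drop c0.toNat).take (c1.toNat - c0.toNat)).length
      = c1.toNat - c0.toNat := by
    rw [List.length_take, List.length_drop]; omega
  by_cases h1 : c < c0.toNat
  · rw [if_neg (by rw [hanyiff]; omega)]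
    rw [List.getElem?_append_left (by rw [List.length_append, hlt, hls]; omega)]
    rw [List.getElem?_append_left (by rw [hlt]; omega)]
    rw [List.getElem?_take_of_lt h1]
  · by_cases h2 : c < c1.toNat
    · rw [if_pos (by rw [hanyiff]; omega)]
      rw [List.getElem?_append_left (by rw [List.length_append, hlt, hls]; omega)]
      rw [List.getElem?_append_right (by rw [hlt]; omega)]
      rw [hlt]
      rw [List.getElem?_take_of_lt (by omega)]
      rw [List.getElem?_drop]
      have hcm : c0.toNat + (c - c0.toNat) = c := by omega
      rw [hcm]
      rw [List.getD_eq_getElem _ 0 (by omega), List.getElem?_eq_getElem (by omega)]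
    · rw [if_neg (by rw [hanyiff]; omega)]
      rw [List.getElem?_append_right (by rw [List.length_append, hlt, hls]; omega)]
      rw [List.length_append, hlt, hls, List.getElem?_drop]
      have hcm : c1.toNat + (c - (c0.toNat + (c1.toNat - c0.toNat))) = c := by omega
      rw [hcm]

-- ===== VERDICT (by name: the statement is the Claim_ definition above) =====
theorem Update_Pacman_view_spec : Claim_equal_Update_Pacman_view := by
  intro map cv pos _ hpre
  unfold Spec_Update_Pacman_view
  by_cases hemp : cv.isEmpty = true
  · have hcv : cv = [] := List.isEmpty_iff.mp hemp
    subst hcv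
    have halt : Update_Pacman_view_alt map [] pos = [] := rfl
    rw [halt]
    apply List.ext_getElem?
    intro r
    rw [pvA_char]
    rw [if_neg (by rw [pvA_any_iff]; simp only [List.length_nil]; omega)]
  · have hne : cv.isEmpty = false := Bool.eq_false_iff.mpr hemp
    by_cases hcc : max 0 (pos.2 - 3) < min (((cv.headD []).length : Int)) (pos.2 + 4)
    · apply List.ext_getElem?
      intro r
      rw [pvA_char, pvB_char map cv pos r hne hcc]
      by_cases hwin : (pos.1 - 3) ≤ (r : Int) ∧ (r : Int) < pos.1 - 3 + 7 ∧ (r : Int) < (cv.length : Int)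
      · rw [if_pos (by rw [pvA_any_iff]; exact hwin)]
        rw [if_pos (by rw [pvB_any_iff _ _ _ (by omega)]; omega)]
        congr 1
        have hr : r < cv.length := by omega
        have hc1pos : (0:Int) < min (((cv.headD []).length : Int)) (pos.2 + 4) := by omega
        have hkey := hpre r hr ((min (((cv.headD []).length : Int)) (pos.2 + 4)).toNat - 1)
          (by omega) ⟨by omega, by omega, by omega, by omega⟩
        exact pvRow_eq map (pos.2 - 3) ((cv.headD []).length) r (cv.getD r [])
          (max 0 (pos.2 - 3)) (min (((cv.headD []).length : Int)) (pos.2 + 4))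
          rfl (by omega) hcc (by omega) (by omega)
      · rw [if_neg (by rw [pvA_any_iff]; exact hwin)]
        rw [if_neg (by rw [pvB_any_iff _ _ _ (by omega)]; omega)]
    · have hBalt : Update_Pacman_view_alt map cv pos = cv := by
        simp only [Update_Pacman_view_alt, hne, Bool.false_eq_true, if_false, if_neg hcc]
      rw [hBalt]
      apply List.ext_getElem?
      intro r
      rw [pvA_char]
      by_cases hwin : (pos.1 - 3) ≤ (r : Int) ∧ (r : Int) < pos.1 - 3 + 7 ∧ (r : Int) < (cv.length : Int)
      · rw [if_pos (by rw [pvA_any_iff]; exact hwin)]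
        rw [pvRowA_id _ _ _ _ _ (by omega)]
        have hr : r < cv.length := by omega
        rw [List.getD_eq_getElem cv [] hr]
        exact (List.getElem?_eq_getElem hr).symm
      · rw [if_neg (by rw [pvA_any_iff]; exact hwin)]
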